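-- pv_equiv track=rewrite | github.com/ofircohen205/aura | apps/backend/src/api/middlewares/logging.py | _parse_forwarded_for
-- ===== SOURCE A (Python) =====
-- def _parse_forwarded_for(header_value: str) -> list[str]:
--     """
--     Parse RFC 7239 Forwarded header into a list of 'for' values (best-effort).
--     """
--     results: list[str] = []
--     for part in header_value.split(","):
--         params = [p.strip() for p in part.split(";") if p.strip()]
--         for param in params:
--             if not param.lower().startswith("for="):
--                 continue
--             value = param[4:].strip().strip('"')
--             # Common forms: 1.2.3.4, "[2001:db8::1]", "1.2.3.4:1234"
--             if value.startswith("[") and "]" in value: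
--                 value = value[1 : value.index("]")]
--             if ":" in value and value.count(":") == 1:
--                 # Likely IPv4:port; keep only host.
--                 value = value.split(":", 1)[0]
--             if value:
--                 results.append(value)
--     return results
-- ===== SOURCE B (Python) =====
-- def _tokens(header_value: str):
--     """Yield parameter tokens by a single character scan: both ',' and ';'
--     end a token (a comma ends the element and its last parameter at once)."""
--     token: list[str] = []
--     for ch in header_value:
--         if ch in ",;":
--             yield "".join(token)
--             token = []
--         else:
--             token.append(ch)
--     yield "".join(token)
--
--
-- def _for_value(token: str):
--     """Return the normalized for= value of one parameter token, or None."""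
--     token = token.strip()
--     if not token.lower().startswith("for="):
--         return None
--     value = token[4:].strip().strip('"')
--     # Common forms: 1.2.3.4, "[2001:db8::1]", "1.2.3.4:1234"
--     if value.startswith("[") and "]" in value:
--         value = value[1 : value.index("]")]
--     if ":" in value and value.count(":") == 1:
--         # Likely IPv4:port; keep only host.
--         value = value.split(":", 1)[0]
--     return value or None
--
--
-- def _parse_forwarded_for(header_value: str) -> list[str]:
--     """
--     Parse RFC 7239 Forwarded header into a list of 'for' values (best-effort).
--
--     Scanner variant: a character-level scan emits every parameter token in one
--     stream (no split calls, no nested loops); a comprehension keeps the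
--     normalized for= values.
--     """
--     return [v for v in map(_for_value, _tokens(header_value)) if v is not None]
-- ===== Notes on version B (the rewrite author's own statement) =====
-- stated objective: alternative
-- what changed: Extraction is rewritten as a character-level scanner: a generator walks the header once, treating ',' and ';' uniformly as token terminators (no split calls, no nested loops), and the result list is a comprehension over the normalized tokens (an Optional-returning helper) instead of imperative appends inside two nested loops.
import Mathlib
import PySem

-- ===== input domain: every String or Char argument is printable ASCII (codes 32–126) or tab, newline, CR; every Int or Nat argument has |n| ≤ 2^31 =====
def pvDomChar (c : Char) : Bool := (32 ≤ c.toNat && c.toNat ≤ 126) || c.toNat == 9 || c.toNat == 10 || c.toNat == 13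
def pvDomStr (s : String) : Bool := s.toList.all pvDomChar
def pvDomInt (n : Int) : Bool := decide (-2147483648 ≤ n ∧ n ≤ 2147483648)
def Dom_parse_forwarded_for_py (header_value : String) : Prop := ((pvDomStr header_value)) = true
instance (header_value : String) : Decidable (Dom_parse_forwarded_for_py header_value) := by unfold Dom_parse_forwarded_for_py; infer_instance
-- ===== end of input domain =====

-- B replaces A's nested split loops by a character-level scanner that emits parameter tokens
-- in one stream and a filter-map over an Optional-returning normalizer. (objective: alternative)

-- ===== PORT A =====
-- Port of A: the nested split loops, transliterated.
-- `value.index("]")` is guarded by `"]" in value`, so it equals PySem.Str.find there;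
-- `value.split(":", 1)[0]` : split with a non-empty separator never returns [], so [0] is ported as .headD "".
def parse_forwarded_for_py (header_value : String) : List String :=
  ((PySem.Str.split? header_value ",").getD []).foldl (fun results part =>
    ((((PySem.Str.split? part ";").getD []).filter
        (fun p => PySem.Str.strip p != "")).map PySem.Str.strip).foldl (fun results param =>
      if !(PySem.Str.startswith (PySem.Str.lower param) "for=") then results
      else
        let value := PySem.Str.stripChars (PySem.Str.strip (PySem.Str.slice param (some 4) none)) "\""
        let value := if PySem.Str.startswith value "[" && PySem.Str.isIn "]" value then
            PySem.Str.slice value (some 1) (some (PySem.Str.find value "]"))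
          else value
        let value := if PySem.Str.isIn ":" value && (PySem.Str.count value ":" == 1) then
            ((PySem.Str.splitMax? value ":" 1).getD []).headD ""
          else value
        if value != "" then results ++ [value] else results) results) []

-- ===== PORT B =====
-- Port of B's `_tokens`: one character scan; ',' and ';' both terminate the current token.
-- `"".join(token)` on the accumulated char list is String.ofList.
def pvTokensB (header_value : String) : List String :=
  let st := header_value.toList.foldl
      (fun (st : List String × List Char) ch =>
        if ch = ',' ∨ ch = ';' then (st.1 ++ [String.ofList st.2], [])
        else (st.1, st.2 ++ [ch]))
      ([], [])
  st.1 ++ [String.ofList st.2]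

-- Port of B's `_for_value`: normalized for= value of one token, or none.
def pvForValueB (token : String) : Option String :=
  let token := PySem.Str.strip token
  if !(PySem.Str.startswith (PySem.Str.lower token) "for=") then none
  else
    let value := PySem.Str.stripChars (PySem.Str.strip (PySem.Str.slice token (some 4) none)) "\""
    let value := if PySem.Str.startswith value "[" && PySem.Str.isIn "]" value then
        PySem.Str.slice value (some 1) (some (PySem.Str.find value "]"))
      else value
    let value := if PySem.Str.isIn ":" value && (PySem.Str.count value ":" == 1) then
        ((PySem.Str.splitMax? value ":" 1).getD []).headD ""
      else value
    if value != "" then some value else none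

-- Port of B: the comprehension `[v for v in map(_for_value, _tokens(h)) if v is not None]`.
def parse_forwarded_for_py_alt (header_value : String) : List String :=
  (((pvTokensB header_value).map pvForValueB).filter Option.isSome).filterMap id

-- ===== PRECONDITION & SPEC =====
def Spec_parse_forwarded_for_py (header_value : String) (out : List String) : Prop := out = parse_forwarded_for_py_alt header_value
instance (header_value : String) (out : List String) : Decidable (Spec_parse_forwarded_for_py header_value out) := by unfold Spec_parse_forwarded_for_py; infer_instance

-- ===== CLAIM (what is proved, stated in full; the proofs are below) =====
def Claim_equal_parse_forwarded_for_py : Prop := ∀ (header_value : String), Dom_parse_forwarded_for_py header_value → Spec_parse_forwarded_for_py header_value (parse_forwarded_for_py header_value)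

-- ===== LEMMAS AND PROOFS =====

def splitCh (d : Char) : List Char → List (List Char)
  | [] => [[]]
  | c :: t => if c = d then [] :: splitCh d t else (splitCh d t).modifyHead (c :: ·)

-- splitting on both delimiters at once
def splitB : List Char → List (List Char)
  | [] => [[]]
  | c :: t => if c = ',' ∨ c = ';' then [] :: splitB t else (splitB t).modifyHead (c :: ·)

theorem splitCh_ne_nil (d : Char) (l : List Char) : splitCh d l ≠ [] := by
  cases l with
  | nil => simp [splitCh]
  | cons c t =>
    simp only [splitCh]
    split
    · simp
    · cases h : splitCh d t with
      | nil => exact absurd h (splitCh_ne_nil d t)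
      | cons a r => simp [List.modifyHead]

theorem splitB_ne_nil (l : List Char) : splitB l ≠ [] := by
  cases l with
  | nil => simp [splitB]
  | cons c t =>
    simp only [splitB]
    split
    · simp
    · cases h : splitB t with
      | nil => exact absurd h (splitB_ne_nil t)
      | cons a r => simp [List.modifyHead]

theorem splitOn_go_singleton (d : Char) :
    ∀ (fuel : Nat) (l cur : List Char) (acc : List (List Char)), l.length < fuel →
      PySem.Chars.splitOn.go [d] fuel l cur acc
        = acc.reverse ++ (splitCh d l).modifyHead (cur.reverse ++ ·) := by
  intro fuel
  induction fuel with
  | zero => intro l cur acc h; omega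
  | succ fuel ih =>
    intro l cur acc h
    cases l with
    | nil => simp [PySem.Chars.splitOn.go, splitCh]
    | cons c rest =>
      rw [PySem.Chars.splitOn.go.eq_def]
      simp only [List.isPrefixOf, Bool.and_true]
      by_cases hc : c = d
      · subst hc
        rw [if_pos (by simp)]
        rw [ih _ _ _ (by simp at h ⊢; omega)]
        simp only [splitCh]
        cases hs : splitCh c rest with
        | nil => exact absurd hs (splitCh_ne_nil c rest)
        | cons a r => simp [hs, List.modifyHead]
      · rw [if_neg (by simp; exact fun e => hc e.symm)]
        rw [ih _ _ _ (by simp at h; omega)]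
        simp only [splitCh, if_neg hc]
        cases hs : splitCh d rest with
        | nil => exact absurd hs (splitCh_ne_nil d rest)
        | cons a r => simp [List.modifyHead]

theorem splitOn_singleton (d : Char) (s : List Char) :
    PySem.Chars.splitOn s [d] = splitCh d s := by
  unfold PySem.Chars.splitOn
  rw [splitOn_go_singleton d (s.length + 1) s [] [] (by omega)]
  cases hs : splitCh d s with
  | nil => exact absurd hs (splitCh_ne_nil d s)
  | cons a r => simp [List.modifyHead]

theorem splitB_eq_map (s : List Char) :
    splitB s = splitCh ';' (s.map (fun c => if c = ',' then ';' else c)) := by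
  induction s with
  | nil => rfl
  | cons c t ih =>
    simp only [List.map_cons, splitB, splitCh]
    by_cases hc : c = ','
    · subst hc
      rw [if_pos (Or.inl rfl), if_pos rfl, if_pos rfl, ih]
    · by_cases hs : c = ';'
      · subst hs
        rw [if_pos (Or.inr rfl), if_neg hc, if_pos rfl, ih]
      · rw [if_neg (by simp [hc, hs]), if_neg hc, if_neg hs, ih]

theorem splitCh_fusion (s : List Char) :
    splitCh ';' (s.map (fun c => if c = ',' then ';' else c))
      = (splitCh ',' s).flatMap (splitCh ';') := by
  induction s with
  | nil => simp [splitCh]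
  | cons c t ih =>
    simp only [List.map_cons]
    by_cases hc : c = ','
    · subst hc
      simp only [splitCh]
      simp [splitCh, ih]
    · rw [if_neg hc]
      by_cases hs : c = ';'
      · subst hs
        simp only [splitCh, if_neg hc]
        cases hsp : splitCh ',' t with
        | nil => exact absurd hsp (splitCh_ne_nil _ t)
        | cons a r =>
          rw [hsp] at ih
          simp only [List.flatMap_cons, List.modifyHead, splitCh]
          rw [ih]
          simp [List.flatMap_cons]
      · simp only [splitCh, if_neg hs, if_neg hc]
        cases hsp : splitCh ',' t with
        | nil => exact absurd hsp (splitCh_ne_nil _ t)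
        | cons a r =>
          rw [hsp] at ih
          simp only [List.flatMap_cons, List.modifyHead, splitCh, if_neg hs]
          rw [ih]
          cases hq : splitCh ';' a with
          | nil => exact absurd hq (splitCh_ne_nil _ a)
          | cons b q => simp only [List.flatMap_cons]; rw [hq]; simp

theorem splitB_fusion (s : List Char) :
    splitB s = (splitCh ',' s).flatMap (splitCh ';') := by
  rw [splitB_eq_map, splitCh_fusion]

-- the scanner fold computes splitB (with the pending token prefixed by cur)
theorem tokensB_go (l : List Char) :
    ∀ (acc : List String) (cur : List Char),
      (let st := l.foldl
          (fun (st : List String × List Char) ch =>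
            if ch = ',' ∨ ch = ';' then (st.1 ++ [String.ofList st.2], [])
            else (st.1, st.2 ++ [ch])) (acc, cur)
       st.1 ++ [String.ofList st.2])
        = acc ++ ((splitB l).modifyHead (cur ++ ·)).map String.ofList := by
  induction l with
  | nil => intro acc cur; simp [splitB, List.modifyHead]
  | cons c t ih =>
    intro acc cur
    simp only [List.foldl_cons]
    by_cases hd : c = ',' ∨ c = ';'
    · rw [if_pos hd]
      simp only at ih ⊢
      rw [ih (acc ++ [String.ofList cur]) []]
      simp only [splitB, if_pos hd, List.modifyHead]
      cases hs : splitB t with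
      | nil => exact absurd hs (splitB_ne_nil t)
      | cons a r => simp
    · rw [if_neg hd]
      simp only at ih ⊢
      rw [ih acc (cur ++ [c])]
      simp only [splitB, if_neg hd]
      cases hs : splitB t with
      | nil => exact absurd hs (splitB_ne_nil t)
      | cons a r => simp [List.modifyHead]

theorem tokensB_eq (s : String) :
    pvTokensB s = (((splitCh ',' s.toList).flatMap (splitCh ';')).map String.ofList) := by
  unfold pvTokensB
  rw [tokensB_go s.toList [] []]
  cases hs : splitB s.toList with
  | nil => exact absurd hs (splitB_ne_nil s.toList)
  | cons a r =>
    rw [← hs, ← splitB_fusion]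
    cases hs2 : splitB s.toList with
    | nil => exact absurd hs2 (splitB_ne_nil s.toList)
    | cons a2 r2 => simp [List.modifyHead]

-- append the value of an optional step
def optStep (r : List String) : Option String → List String
  | some v => r ++ [v]
  | none => r

-- appending when non-empty, seen through the Option step
theorem step_of_val (r : List String) (v : String) :
    (if v != "" then r ++ [v] else r)
      = optStep r (if v != "" then some v else none) := by
  cases h : (v != "") <;> simp [optStep]

-- A's per-token body over an abstract normalization chain (c0: prefix test, x: stripped
-- value, c1/f: bracket step, c2/g: colon step); keeps the big concrete terms opaque.
theorem body_eq (r : List String) (t : String) (c0 : Bool) (x : String)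
    (c1 c2 : String → Bool) (f g : String → String) (h0 : t = "" → c0 = false) :
    (if t != "" then
       (if !c0 then r else
        let v := x
        let v := if c1 v then f v else v
        let v := if c2 v then g v else v
        if v != "" then r ++ [v] else r)
     else r)
    = optStep r (if !c0 then none else
        let v := x
        let v := if c1 v then f v else v
        let v := if c2 v then g v else v
        if v != "" then some v else none) := by
  cases hc : c0 with
  | false => simp [optStep]
  | true =>
    have ht : (t != "") = true := by
      by_cases he : t = ""
      · exact absurd (h0 he) (by simp [hc])
      · simpa using he
    rw [if_pos ht]
    simp only [Bool.not_true, Bool.false_eq_true, if_false]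
    exact step_of_val r _

-- A's per-token update equals the option-valued step through pvForValueB
theorem token_step (r : List String) (p : String) :
    (if PySem.Str.strip p != "" then
       (if !(PySem.Str.startswith (PySem.Str.lower (PySem.Str.strip p)) "for=") then r
        else
          let value := PySem.Str.stripChars (PySem.Str.strip (PySem.Str.slice (PySem.Str.strip p) (some 4) none)) "\""
          let value := if PySem.Str.startswith value "[" && PySem.Str.isIn "]" value then
              PySem.Str.slice value (some 1) (some (PySem.Str.find value "]")) else value
          let value := if PySem.Str.isIn ":" value && (PySem.Str.count value ":" == 1) then
              ((PySem.Str.splitMax? value ":" 1).getD []).headD "" else value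
          if value != "" then r ++ [value] else r)
     else r)
    = optStep r (pvForValueB p) := by
  unfold pvForValueB
  exact body_eq r (PySem.Str.strip p)
    (PySem.Str.startswith (PySem.Str.lower (PySem.Str.strip p)) "for=")
    (PySem.Str.stripChars (PySem.Str.strip (PySem.Str.slice (PySem.Str.strip p) (some 4) none)) "\"")
    (fun v => PySem.Str.startswith v "[" && PySem.Str.isIn "]" v)
    (fun v => PySem.Str.isIn ":" v && (PySem.Str.count v ":" == 1))
    (fun v => PySem.Str.slice v (some 1) (some (PySem.Str.find v "]")))
    (fun v => ((PySem.Str.splitMax? v ":" 1).getD []).headD "")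
    (fun h => by rw [h]; decide)

-- folding an option-valued append step is filter+filterMap over the mapped list
theorem foldl_opt_append (f : String → Option String) :
    ∀ (l : List String) (r : List String),
      l.foldl (fun r p => optStep r (f p)) r
        = r ++ ((l.map f).filter Option.isSome).filterMap id := by
  intro l
  induction l with
  | nil => intro r; simp
  | cons p t ih =>
    intro r
    simp only [List.foldl_cons, List.map_cons]
    cases hf : f p with
    | none => rw [ih]; simp [optStep]
    | some v => rw [ih]; simp [optStep]

-- ===== VERDICT (by name: the statement is the Claim_ definition above) =====
set_option maxHeartbeats 1000000 in
theorem parse_forwarded_for_py_spec : Claim_equal_parse_forwarded_for_py := by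
  intro hv _
  unfold Spec_parse_forwarded_for_py parse_forwarded_for_py parse_forwarded_for_py_alt
  have hsplitA : (PySem.Str.split? hv ",").getD [] = (splitCh ',' hv.toList).map String.ofList := by
    simp [PySem.Str.split?, PySem.Chars.split?, show (",".toList) = [','] from rfl, splitOn_singleton]
  have hB : (((pvTokensB hv).map pvForValueB).filter Option.isSome).filterMap id
      = ((((splitCh ',' hv.toList).flatMap (splitCh ';')).map String.ofList)).foldl
          (fun r p => optStep r (pvForValueB p)) [] := by
    rw [foldl_opt_append, tokensB_eq]
    simp
  rw [hsplitA, hB, List.foldl_map]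
  rw [show (((splitCh ',' hv.toList).flatMap (splitCh ';')).map String.ofList)
      = (splitCh ',' hv.toList).flatMap (fun pc => (splitCh ';' pc).map String.ofList) from by
    simp [List.map_flatMap]]
  rw [List.foldl_flatMap]
  refine congrFun (congrFun (congrArg List.foldl (funext fun r => funext fun pc => ?_)) []) _
  have hinner : (PySem.Str.split? (String.ofList pc) ";").getD [] = (splitCh ';' pc).map String.ofList := by
    simp [PySem.Str.split?, PySem.Chars.split?, show (";".toList) = [';'] from rfl, splitOn_singleton]
  rw [hinner, List.foldl_map, List.foldl_filter, List.foldl_map, List.foldl_map]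
  refine congrFun (congrFun (congrArg List.foldl (funext fun x => funext fun y => ?_)) r) _
  exact token_step x (String.ofList y)
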